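-- pv_equiv track=rewrite | github.com/watsonryan/ion_gnss24_fg_code_examples | examples/helpers/rinex.py | _split_header_and_data
-- ===== SOURCE A (Python) =====
-- from typing import List, Dict, Optional
--
-- def _split_header_and_data(lines: List[str]) -> (List[str], List[str]):
--     """Split the header and data sections."""
--     header_lines = []
--     data_lines = []
--     in_header = True
--
--     for line in lines:
--         if in_header:
--             header_lines.append(line)
--             if 'END OF HEADER' in line:
--                 in_header = False
--         else:
--             data_lines.append(line)
--
--     return header_lines, data_lines
-- ===== SOURCE B (Python) =====
-- def _split_header_and_data(lines):
--     """Split the header and data sections (locate marker, then slice)."""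
--     i = next((k for k, line in enumerate(lines) if 'END OF HEADER' in line),
--              len(lines) - 1)
--     return lines[:i + 1], lines[i + 1:]
-- ===== Notes on version B (the rewrite author's own statement) =====
-- stated objective: simpler
-- what changed: Replaces the per-line boolean-flag loop that appends to two accumulators with a locate-then-slice decomposition: find the index of the first 'END OF HEADER' line (defaulting to the last index) and return the two slices around it.
import Mathlib
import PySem

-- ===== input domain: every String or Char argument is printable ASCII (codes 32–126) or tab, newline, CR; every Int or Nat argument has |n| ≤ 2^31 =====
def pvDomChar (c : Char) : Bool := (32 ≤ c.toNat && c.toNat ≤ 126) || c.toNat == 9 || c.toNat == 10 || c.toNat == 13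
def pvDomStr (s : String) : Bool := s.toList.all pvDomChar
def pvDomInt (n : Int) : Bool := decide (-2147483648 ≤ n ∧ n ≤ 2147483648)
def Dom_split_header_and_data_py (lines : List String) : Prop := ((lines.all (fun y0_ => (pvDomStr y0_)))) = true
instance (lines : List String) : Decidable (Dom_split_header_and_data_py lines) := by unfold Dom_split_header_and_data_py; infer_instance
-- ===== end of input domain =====

-- B replaces A's per-line boolean-flag dispatch with locate-the-marker-then-slice; objective: simpler.


-- ===== PORT A =====
-- one step of A's for-loop over state (header_lines, data_lines, in_header)
def splitStepA (st : List String × List String × Bool) (line : String) :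
    List String × List String × Bool :=
  if st.2.2 then
    (st.1 ++ [line], st.2.1, if PySem.Str.isIn "END OF HEADER" line then false else true)
  else
    (st.1, st.2.1 ++ [line], false)

def split_header_and_data_py (lines : List String) : List String × List String :=
  let r := lines.foldl splitStepA ([], [], true)
  (r.1, r.2.1)

-- ===== PORT B =====
def split_header_and_data_py_alt (lines : List String) : List String × List String :=
  let i : Int :=
    match lines.findIdx? (fun line => PySem.Str.isIn "END OF HEADER" line) with
    | some k => (k : Int)
    | none => (lines.length : Int) - 1
  (PySem.List.slice lines none (some (i + 1)), PySem.List.slice lines (some (i + 1)) none)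

-- ===== PRECONDITION & SPEC =====
def Spec_split_header_and_data_py (lines : List String) (out : List String × List String) : Prop := out = split_header_and_data_py_alt lines
instance (lines : List String) (out : List String × List String) : Decidable (Spec_split_header_and_data_py lines out) := by unfold Spec_split_header_and_data_py; infer_instance

-- ===== CLAIM (what is proved, stated in full; the proofs are below) =====
def Claim_equal_split_header_and_data_py : Prop := ∀ (lines : List String), Dom_split_header_and_data_py lines → Spec_split_header_and_data_py lines (split_header_and_data_py lines)

-- ===== LEMMAS AND PROOFS =====

-- After the flag has dropped, the loop only appends to data_lines.
theorem foldl_splitStepA_false (lines : List String) (h d : List String) :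
    lines.foldl splitStepA (h, d, false) = (h, d ++ lines, false) := by
  induction lines generalizing d with
  | nil => simp
  | cons l ls ih => simp [splitStepA, List.foldl_cons, ih]

-- Characterisation of A's loop started with the flag up.
theorem foldl_splitStepA_true (lines : List String) (h d : List String) :
    lines.foldl splitStepA (h, d, true) =
      match lines.findIdx? (fun line => PySem.Str.isIn "END OF HEADER" line) with
      | some i => (h ++ lines.take (i + 1), d ++ lines.drop (i + 1), false)
      | none => (h ++ lines, d, true) := by
  induction lines generalizing h with
  | nil => simp
  | cons l ls ih =>
    rw [List.foldl_cons, List.findIdx?_cons]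
    simp only [splitStepA]
    cases hp : PySem.Str.isIn "END OF HEADER" l with
    | true =>
      simp only [if_true]
      rw [foldl_splitStepA_false ls (h ++ [l]) d]
      simp
    | false =>
      simp only [Bool.false_eq_true, if_false, if_true]
      rw [ih (h ++ [l])]
      cases hfi : ls.findIdx? (fun line => PySem.Str.isIn "END OF HEADER" line) with
      | none => simp
      | some i => simp

theorem split_eq (lines : List String) :
    split_header_and_data_py lines = split_header_and_data_py_alt lines := by
  unfold split_header_and_data_py split_header_and_data_py_alt
  rw [foldl_splitStepA_true lines [] []]
  cases hfi : lines.findIdx? (fun line => PySem.Str.isIn "END OF HEADER" line) with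
  | some i =>
    show (lines.take (i + 1), lines.drop (i + 1)) =
      (PySem.List.slice lines none (some ((i : Int) + 1)),
       PySem.List.slice lines (some ((i : Int) + 1)) none)
    have hc : ((i : Int) + 1) = ((i + 1 : Nat) : Int) := by push_cast; ring
    rw [hc, PySem.List.slice_to_natCast, PySem.List.slice_from_natCast]
  | none =>
    show (lines, ([] : List String)) =
      (PySem.List.slice lines none (some ((lines.length : Int) - 1 + 1)),
       PySem.List.slice lines (some ((lines.length : Int) - 1 + 1)) none)
    have hc : ((lines.length : Int) - 1 + 1) = ((lines.length : Nat) : Int) := by ring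
    rw [hc, PySem.List.slice_to_natCast, PySem.List.slice_from_natCast]
    simp

-- ===== VERDICT (by name: the statement is the Claim_ definition above) =====
theorem split_header_and_data_py_spec : Claim_equal_split_header_and_data_py := by
  intro lines _
  exact split_eq lines
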